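-- pv_equiv track=rewrite | github.com/yeonjaedev/algorithm | algorithm/pr_lv2_42586.py | solution
-- ===== SOURCE A (Python) =====
-- import math
--
-- def solution(progresses, speeds):
--     answer = []
--
--     workDay = []
--     for i in range(len(progresses)):
--         workDay.append(math.ceil((100-progresses[i])/speeds[i]))
--     i = 0
--     while i < len(progresses):
--         cnt = 1
--         if i+1 == len(progresses):
--             answer.append(cnt)
--             break
--         maxNum = workDay[i]
--         while maxNum >= workDay[i+1]: # 이부분을 workDay[i] 로 처음에 풀이 했었음,, 앞뒤꺼의 크기만 비교하면 되는줄알고,, 그게 아니라 배포하는 날의 해당 값보다 작으면 됐던것 ,,,,!!!! > 문제 제대로 읽기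
--             cnt+=1
--             i+=1
--             if i == len(progresses)-1:
--                 break
--         i+=1
--         answer.append(cnt)
--
--     return answer
-- ===== SOURCE B (Python) =====
-- import math
--
-- def solution(progresses, speeds):
--     # stage 1: the day each task actually ships = running maximum of its own work days
--     release = []
--     for p, s in zip(progresses, speeds):
--         d = math.ceil((100 - p) / s)
--         if release and release[-1] > d:
--             d = release[-1]
--         release.append(d)
--     # stage 2: run-length encode: tasks shipping on the same day form one deployment
--     answer = []
--     prev = None
--     for r in release:
--         if prev == r:
--             answer[-1] += 1
--         else:
--             answer.append(1)
--         prev = r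
--     return answer
-- ===== Notes on version B (the rewrite author's own statement) =====
-- stated objective: alternative
-- what changed: Replaced A's nested leader-comparison while loops with two staged passes: first compute each task's actual release day as the running maximum of its work days, then run-length-encode equal adjacent release days into deployment counts.
import Mathlib
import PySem

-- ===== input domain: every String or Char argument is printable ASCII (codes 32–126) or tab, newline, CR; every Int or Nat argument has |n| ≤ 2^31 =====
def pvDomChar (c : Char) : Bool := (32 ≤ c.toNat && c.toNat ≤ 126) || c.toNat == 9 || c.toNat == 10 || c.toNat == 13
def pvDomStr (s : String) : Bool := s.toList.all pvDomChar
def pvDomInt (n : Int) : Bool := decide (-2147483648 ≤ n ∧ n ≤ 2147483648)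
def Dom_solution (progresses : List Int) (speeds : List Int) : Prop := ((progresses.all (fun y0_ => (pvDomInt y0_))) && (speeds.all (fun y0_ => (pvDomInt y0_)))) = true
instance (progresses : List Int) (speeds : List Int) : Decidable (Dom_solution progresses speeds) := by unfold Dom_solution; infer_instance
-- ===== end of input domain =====

-- B replaces A's nested leader-comparison while loops by two staged passes: a running-maximum
-- pass giving each task's release day, then a run-length encoding of equal adjacent release
-- days (objective: alternative). Equality of return values is proved on Pre_.

-- math.ceil((100-p)/s) as exact integer ceiling division: exact on Dom, where
-- |100-p| ≤ 2^31+100 < 2^53, so the float division cannot round across an integer.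
def pvCeilDiv (a b : Int) : Int := -(PySem.Int.floordiv (-a) b)

-- ===== PORT A =====
-- inner 'while maxNum >= workDay[i+1]' loop; returns (cnt, i). fuel is only a
-- structural-termination guard (callers pass enough fuel; Python would raise
-- IndexError past the end, excluded by Pre_).
def solutionInner (fuel : Nat) (wd : List Int) (n : Nat) (maxNum : Int) (cnt : Int) (i : Nat) : Int × Nat :=
  match fuel with
  | 0 => (cnt, i)
  | fuel + 1 =>
    if maxNum ≥ PySem.List.pyGetD wd ((i : Int) + 1) 0 then
      if i + 1 = n - 1 then (cnt + 1, i + 1)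
      else solutionInner fuel wd n maxNum (cnt + 1) (i + 1)
    else (cnt, i)

-- outer 'while i < len(progresses)' loop
def solutionLoop (fuel : Nat) (wd : List Int) (n : Nat) (i : Nat) (answer : List Int) : List Int :=
  match fuel with
  | 0 => answer
  | fuel + 1 =>
    if i < n then
      if i + 1 = n then answer ++ [1]
      else
        let maxNum := PySem.List.pyGetD wd (i : Int) 0
        let r := solutionInner n wd n maxNum 1 i
        solutionLoop fuel wd n (r.2 + 1) (answer ++ [r.1])
    else answer

def solution (progresses : List Int) (speeds : List Int) : List Int :=
  let n := progresses.length
  let workDay := (PySem.List.pyRange 0 (n : Int) 1).foldl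
    (fun acc i => acc ++ [pvCeilDiv (100 - PySem.List.pyGetD progresses i 0) (PySem.List.pyGetD speeds i 0)]) []
  solutionLoop (n + 1) workDay n 0 []

-- ===== PORT B =====
-- 'answer[-1] += 1' (answer is nonempty whenever Python reaches it; on [] this is the identity)
def pvIncLast (l : List Int) : List Int :=
  match l.getLast? with
  | some x => l.dropLast ++ [x + 1]
  | none => l

def solution_alt (progresses : List Int) (speeds : List Int) : List Int :=
  let release := (progresses.zip speeds).foldl
    (fun acc ps =>
      let d := pvCeilDiv (100 - ps.1) ps.2
      let d := match acc.getLast? with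
        | some m => if m > d then m else d
        | none => d
      acc ++ [d]) []
  (release.foldl
    (fun (st : Option Int × List Int) r =>
      if st.1 = some r then (some r, pvIncLast st.2)
      else (some r, st.2 ++ [1])) ((none : Option Int), ([] : List Int))).2

-- ===== PRECONDITION & SPEC =====
-- Pre_ excludes exactly the inputs on which A raises: a speeds list shorter than
-- progresses (IndexError) or a zero speed used by some progress (ZeroDivisionError).
def Pre_solution (progresses : List Int) (speeds : List Int) : Prop :=
  progresses.length ≤ speeds.length ∧ ∀ x ∈ speeds.take progresses.length, x ≠ 0
instance (progresses : List Int) (speeds : List Int) : Decidable (Pre_solution progresses speeds) := by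
  unfold Pre_solution; infer_instance

def pvWitness_solution : List Int × List Int := ([93, 30, 55, 60, 40, 65], [1, 30, 5, 5, 20, 5])

def Spec_solution (progresses : List Int) (speeds : List Int) (out : List Int) : Prop := out = solution_alt progresses speeds
instance (progresses : List Int) (speeds : List Int) (out : List Int) : Decidable (Spec_solution progresses speeds out) := by unfold Spec_solution; infer_instance

-- ===== CLAIM (what is proved, stated in full; the proofs are below) =====
def Claim_equal_solution : Prop := ∀ (progresses : List Int) (speeds : List Int), Dom_solution progresses speeds → Pre_solution progresses speeds → Spec_solution progresses speeds (solution progresses speeds)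

-- ===== LEMMAS AND PROOFS =====

-- the common grouping semantics: first day of each group is its deadline
def pvGroups : List Int → List Int
  | [] => []
  | d :: rest =>
    (1 + ((rest.takeWhile (fun x => x ≤ d)).length : Int)) ::
      pvGroups (rest.dropWhile (fun x => x ≤ d))
termination_by l => l.length
decreasing_by
  have := List.length_dropWhile_le (p := fun x => x ≤ d) (l := rest)
  simp; omega

theorem pvDropWhile_eq_drop (p : Int → Bool) (l : List Int) :
    l.dropWhile p = l.drop (l.takeWhile p).length := by
  induction l with
  | nil => rfl
  | cons x xs ih =>
    by_cases hx : p x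
    · simp [hx, ih]
    · simp [hx]

theorem pvInner_eq (fuel : Nat) (wd : List Int) (m : Int) :
    ∀ (c : Int) (i : Nat), i + 1 < wd.length → wd.length ≤ fuel + i + 1 →
    solutionInner fuel wd wd.length m c i =
      (c + (((wd.drop (i+1)).takeWhile (fun x => x ≤ m)).length : Int),
       i + ((wd.drop (i+1)).takeWhile (fun x => x ≤ m)).length) := by
  induction fuel with
  | zero => intro c i hi hf; exact absurd hf (by omega)
  | succ fuel ih =>
    intro c i hi hf
    have hw : PySem.List.pyGetD wd ((i : Int) + 1) 0 = wd[i+1] := by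
      have : ((i : Int) + 1) = ((i + 1 : Nat) : Int) := by push_cast; ring
      rw [this, PySem.List.pyGetD_natCast, List.getD_eq_getElem?_getD, List.getElem?_eq_getElem hi]
      rfl
    have hdrop : wd.drop (i+1) = wd[i+1] :: wd.drop (i+2) := List.drop_eq_getElem_cons hi
    rw [solutionInner, hw]
    by_cases hc : m ≥ wd[i+1]
    · have hb : decide (wd[i+1] ≤ m) = true := decide_eq_true hc
      have htw : (wd.drop (i+1)).takeWhile (fun x => decide (x ≤ m))
          = wd[i+1] :: (wd.drop (i+2)).takeWhile (fun x => decide (x ≤ m)) := by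
        rw [hdrop, List.takeWhile_cons, hb]
        rfl
      by_cases he : i + 1 = wd.length - 1
      · have hnil : wd.drop (i+2) = [] := List.drop_eq_nil_of_le (by omega)
        rw [if_pos hc, if_pos he, htw, hnil]
        simp
      · have h2 : i + 1 + 1 < wd.length := by omega
        rw [if_pos hc, if_neg he, ih (c+1) (i+1) h2 (by omega), htw]
        have h12 : i + 1 + 1 = i + 2 := rfl
        rw [h12]
        simp only [List.length_cons, Prod.mk.injEq]
        refine ⟨by push_cast; ring, by omega⟩
    · rw [if_neg hc]
      have hb : decide (wd[i+1] ≤ m) = false := decide_eq_false (by omega)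
      have htw : (wd.drop (i+1)).takeWhile (fun x => decide (x ≤ m)) = [] := by
        rw [hdrop, List.takeWhile_cons, hb]
        rfl
      rw [htw]
      simp

theorem pvLoop_eq (fuel : Nat) (wd : List Int) :
    ∀ (i : Nat) (ans : List Int), wd.length < fuel + i →
    solutionLoop fuel wd wd.length i ans = ans ++ pvGroups (wd.drop i) := by
  induction fuel with
  | zero =>
    intro i ans hf
    have : wd.drop i = [] := List.drop_eq_nil_of_le (by omega)
    simp [solutionLoop, this, pvGroups]
  | succ fuel ih =>
    intro i ans hf
    rw [solutionLoop]
    by_cases h : i < wd.length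
    · have hi : PySem.List.pyGetD wd (i : Int) 0 = wd[i] := by
        rw [PySem.List.pyGetD_natCast, List.getD_eq_getElem?_getD, List.getElem?_eq_getElem h]
        rfl
      have hdrop : wd.drop i = wd[i] :: wd.drop (i+1) := List.drop_eq_getElem_cons h
      by_cases he : i + 1 = wd.length
      · have hnil : wd.drop (i+1) = [] := List.drop_eq_nil_of_le (by omega)
        rw [if_pos h, if_pos he]
        conv_rhs => rw [hdrop, hnil, pvGroups]
        simp [pvGroups]
      · have h1 : i + 1 < wd.length := by omega
        rw [if_pos h, if_neg he]
        simp only [hi]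
        rw [pvInner_eq wd.length wd wd[i] 1 i h1 (by omega),
          ih (i + ((wd.drop (i+1)).takeWhile (fun x => x ≤ wd[i])).length + 1) _ (by omega)]
        conv_rhs => rw [hdrop, pvGroups]
        rw [pvDropWhile_eq_drop, List.drop_drop]
        have hidx : i + 1 + (List.takeWhile (fun x => decide (x ≤ wd[i])) (wd.drop (i+1))).length
            = i + (List.takeWhile (fun x => decide (x ≤ wd[i])) (wd.drop (i+1))).length + 1 := by omega
        rw [hidx]
        simp [List.append_assoc]
    · rw [if_neg h]
      have : wd.drop i = [] := List.drop_eq_nil_of_le (by omega)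
      simp [this, pvGroups]

-- B-side semantics: running maximum as a recursive function
def pvRelAux (m : Int) : List Int → List Int
  | [] => []
  | d :: rest => (if m > d then m else d) :: pvRelAux (if m > d then m else d) rest

def pvRel : List Int → List Int
  | [] => []
  | d :: rest => d :: pvRelAux d rest

theorem pvRelFold_eq (days : List Int) :
    ∀ (acc : List Int) (m : Int), acc.getLast? = some m →
    days.foldl (fun acc d =>
      acc ++ [match acc.getLast? with
        | some m => if m > d then m else d
        | none => d]) acc = acc ++ pvRelAux m days := by
  induction days with
  | nil => intro acc m _; simp [pvRelAux]
  | cons d rest ih =>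
    intro acc m hm
    simp only [List.foldl_cons, hm]
    rw [ih (acc ++ [if m > d then m else d]) (if m > d then m else d) (by simp)]
    simp [pvRelAux]

theorem pvRelFold_nil (days : List Int) :
    days.foldl (fun acc d =>
      acc ++ [match acc.getLast? with
        | some m => if m > d then m else d
        | none => d]) [] = pvRel days := by
  cases days with
  | nil => rfl
  | cons d rest =>
    simp only [List.foldl_cons, List.getLast?_nil, List.nil_append]
    rw [pvRelFold_eq rest [d] d (by simp)]
    simp [pvRel]

theorem pvRelAux_split (d : Int) (rest : List Int) :
    pvRelAux d rest =
      List.replicate (rest.takeWhile (fun x => x ≤ d)).length d ++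
        pvRel (rest.dropWhile (fun x => x ≤ d)) := by
  induction rest with
  | nil => simp [pvRelAux, pvRel]
  | cons x xs ih =>
    by_cases hx : x ≤ d
    · have hd : (if d > x then d else x) = d := by
        by_cases h : d > x
        · simp [h]
        · simp [h]; omega
      simp only [pvRelAux, hd, List.takeWhile_cons, List.dropWhile_cons, decide_eq_true hx]
      rw [ih]
      simp [List.replicate_succ]
    · have hgt : ¬ d > x := by omega
      simp only [pvRelAux, if_neg hgt, List.takeWhile_cons, List.dropWhile_cons,
        decide_eq_false hx]
      simp [pvRel]

theorem pvDropWhile_head_false (p : Int → Bool) (l : List Int) (y : Int) (ys : List Int)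
    (h : l.dropWhile p = y :: ys) : p y = false := by
  induction l with
  | nil => simp [List.dropWhile] at h
  | cons a as ih =>
    by_cases ha : p a
    · rw [List.dropWhile_cons, if_pos ha] at h
      exact ih h
    · rw [List.dropWhile_cons, if_neg ha] at h
      cases h
      simpa using ha

theorem pvIncLast_concat (A : List Int) (c : Int) : pvIncLast (A ++ [c]) = A ++ [c + 1] := by
  simp [pvIncLast]

-- the RLE step function of port B
def pvRleStep (st : Option Int × List Int) (r : Int) : Option Int × List Int :=
  if st.1 = some r then (some r, pvIncLast st.2)
  else (some r, st.2 ++ [1])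

theorem pvRleConst (k : Nat) (d : Int) :
    ∀ (A : List Int) (c : Int) (tail : List Int),
    (List.replicate k d ++ tail).foldl pvRleStep (some d, A ++ [c]) =
      tail.foldl pvRleStep (some d, A ++ [c + k]) := by
  induction k with
  | zero => intro A c tail; simp
  | succ k ih =>
    intro A c tail
    simp only [List.replicate_succ, List.cons_append, List.foldl_cons]
    have hstep : pvRleStep (some d, A ++ [c]) d = (some d, A ++ [c + 1]) := by
      simp [pvRleStep, pvIncLast_concat]
    have harg : c + 1 + (k : Int) = c + ((k + 1 : Nat) : Int) := by push_cast; ring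
    rw [hstep, ih A (c + 1) tail, harg]

-- condition: the previous release day (if any) is strictly below the first day of 'days'
def pvPrevLt (p : Option Int) (days : List Int) : Prop :=
  match days with
  | [] => True
  | x :: _ => ∀ q, p = some q → q < x

theorem pvRle_rel (n : Nat) :
    ∀ (days : List Int), days.length ≤ n → ∀ (p : Option Int) (A : List Int),
    pvPrevLt p days →
    ((pvRel days).foldl pvRleStep (p, A)).2 = A ++ pvGroups days := by
  induction n with
  | zero =>
    intro days hlen p A _
    have : days = [] := List.eq_nil_of_length_eq_zero (by omega)
    subst this
    simp [pvRel, pvGroups]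
  | succ n ih =>
    intro days hlen p A hp
    cases days with
    | nil => simp [pvRel, pvGroups]
    | cons x xs =>
      have hne : ¬ p = some x := by
        intro h
        have := hp x h
        omega
      simp only [pvRel, List.foldl_cons]
      have hstep : pvRleStep (p, A) x = (some x, A ++ [1]) := by
        simp [pvRleStep, hne]
      rw [hstep, pvRelAux_split x xs,
        pvRleConst ((xs.takeWhile (fun x_1 => x_1 ≤ x)).length) x A 1 _]
      set u := xs.dropWhile (fun x_1 => x_1 ≤ x) with hu
      have hulen : u.length ≤ n := by
        rw [hu]
        have h1 := List.length_dropWhile_le (p := fun x_1 => x_1 ≤ x) (l := xs)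
        simp only [List.length_cons] at hlen
        omega
      have hpu : pvPrevLt (some x) u := by
        cases hcu : u with
        | nil => trivial
        | cons y ys =>
          intro q hq
          have hy := pvDropWhile_head_false (fun x_1 => decide (x_1 ≤ x)) xs y ys
            (hu.symm.trans hcu)
          simp at hy
          cases hq
          omega
      rw [ih u hulen (some x) _ hpu]
      conv_rhs => rw [pvGroups]
      rw [hu]
      simp [List.append_assoc]

theorem pvAlt_eq_groups (progresses speeds : List Int) :
    solution_alt progresses speeds =
      pvGroups ((progresses.zip speeds).map (fun ps => pvCeilDiv (100 - ps.1) ps.2)) := by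
  unfold solution_alt
  simp only []
  set days := (progresses.zip speeds).map (fun ps => pvCeilDiv (100 - ps.1) ps.2) with hd
  have h1 : (progresses.zip speeds).foldl
      (fun acc ps =>
        let d := pvCeilDiv (100 - ps.1) ps.2
        let d := match acc.getLast? with
          | some m => if m > d then m else d
          | none => d
        acc ++ [d]) [] =
      days.foldl (fun acc d =>
        acc ++ [match acc.getLast? with
          | some m => if m > d then m else d
          | none => d]) [] := by
    rw [hd, List.foldl_map]
  rw [h1, pvRelFold_nil days]
  have := pvRle_rel days.length days (le_refl _) none [] (by cases days <;> simp [pvPrevLt])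
  simpa [pvRleStep] using this

theorem pvBuild_eq (ps ss : List Int) (h : ps.length ≤ ss.length) :
    (PySem.List.pyRange 0 (ps.length : Int) 1).foldl
      (fun acc i => acc ++ [pvCeilDiv (100 - PySem.List.pyGetD ps i 0) (PySem.List.pyGetD ss i 0)]) []
    = (ps.zip ss).map (fun p => pvCeilDiv (100 - p.1) p.2) := by
  rw [PySem.List.foldl_append_singleton_eq_map, List.nil_append]
  apply List.ext_getElem
  · simp [PySem.List.length_pyRange_one, List.length_zip]
    omega
  · intro k h1 h2
    simp only [List.getElem_map, PySem.List.getElem_pyRange_one, List.getElem_zip]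
    have hk : k < ps.length := by
      simpa [PySem.List.length_pyRange_one] using h1
    have hp : PySem.List.pyGetD ps ((0 : Int) + k) 0 = ps[k] := by
      rw [zero_add, PySem.List.pyGetD_natCast, List.getD_eq_getElem?_getD,
        List.getElem?_eq_getElem hk]; rfl
    have hs2 : PySem.List.pyGetD ss ((0 : Int) + k) 0 = ss[k] := by
      rw [zero_add, PySem.List.pyGetD_natCast, List.getD_eq_getElem?_getD,
        List.getElem?_eq_getElem (by omega : k < ss.length)]; rfl
    rw [hp, hs2]

-- ===== VERDICT (by name: the statement is the Claim_ definition above) =====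
theorem solution_spec : Claim_equal_solution := by
  intro ps ss _ hpre
  unfold Spec_solution solution
  simp only []
  rw [pvBuild_eq ps ss hpre.1, pvAlt_eq_groups]
  have hlen : ((ps.zip ss).map (fun p => pvCeilDiv (100 - p.1) p.2)).length = ps.length := by
    simp [List.length_zip, Nat.min_eq_left hpre.1]
  rw [← hlen,
    pvLoop_eq (((ps.zip ss).map (fun p => pvCeilDiv (100 - p.1) p.2)).length + 1)
      ((ps.zip ss).map (fun p => pvCeilDiv (100 - p.1) p.2)) 0 [] (by omega)]
  simp
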